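-- pv_equiv track=rewrite | github.com/bhanuc/aexy | backend/src/aexy/services/career_progression.py | _estimate_developer_level
-- ===== SOURCE A (Python) =====
-- from typing import Any
--
-- def _estimate_developer_level(fingerprint: dict[str, Any]) -> int:
--     """Estimate current developer level based on skill fingerprint."""
--     languages = fingerprint.get("languages") or []
--
--     if not languages:
--         return 1
--
--     # Get highest proficiency
--     max_proficiency = max(
--         (l.get("proficiency_score", 0) for l in languages),
--         default=0,
--     )
--
--     if max_proficiency >= 85:
--         return 4  # Staff level
--     elif max_proficiency >= 70:
--         return 3  # Senior level
--     elif max_proficiency >= 50: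
--         return 2  # Mid level
--     else:
--         return 1  # Junior level
-- ===== SOURCE B (Python) =====
-- from typing import Any
--
--
-- def _level_of(language: dict[str, Any]) -> int:
--     """Classify a single language's proficiency score into a level."""
--     score = language.get("proficiency_score", 0)
--     if score >= 85:
--         return 4
--     if score >= 70:
--         return 3
--     if score >= 50:
--         return 2
--     return 1
--
--
-- def _estimate_developer_level(fingerprint: dict[str, Any]) -> int:
--     """Estimate current developer level based on skill fingerprint."""
--     best_level = 1
--     for language in fingerprint.get("languages") or []:
--         best_level = max(best_level, _level_of(language))
--     return best_level
-- ===== Notes on version B (the rewrite author's own statement) =====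
-- stated objective: simpler
-- what changed: Replaces the empty-list early return and the reduce-then-classify structure (max of all scores, then threshold that max) with a single classify-each-then-reduce pass keeping a running best level starting at 1; correct because the level classification is monotone in the score.
import Mathlib
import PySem

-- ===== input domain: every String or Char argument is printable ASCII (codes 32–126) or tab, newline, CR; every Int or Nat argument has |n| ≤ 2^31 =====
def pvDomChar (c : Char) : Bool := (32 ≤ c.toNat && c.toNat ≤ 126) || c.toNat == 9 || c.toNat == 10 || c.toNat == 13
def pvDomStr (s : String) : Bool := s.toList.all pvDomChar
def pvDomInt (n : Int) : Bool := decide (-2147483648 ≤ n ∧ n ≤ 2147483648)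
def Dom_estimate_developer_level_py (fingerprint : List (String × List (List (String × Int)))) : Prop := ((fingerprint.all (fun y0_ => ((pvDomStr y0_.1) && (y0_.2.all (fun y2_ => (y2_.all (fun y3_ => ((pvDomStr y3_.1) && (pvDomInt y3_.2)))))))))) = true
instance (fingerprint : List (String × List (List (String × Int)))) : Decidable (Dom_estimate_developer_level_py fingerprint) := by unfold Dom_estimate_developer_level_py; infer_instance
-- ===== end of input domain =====

-- B replaces A's reduce-then-classify (max score, then thresholds) by a classify-each-then-fold-max pass
-- starting from level 1 (simpler decomposition; level is monotone in the score).

-- ===== PORT A =====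
-- `fingerprint.get("languages") or []`: a missing key gives None→[], a present empty list gives []; both are `.getD []`.
def estimate_developer_level_py (fingerprint : List (String × List (List (String × Int)))) : Int :=
  let languages := (fingerprint.lookup "languages").getD []
  if languages.isEmpty then 1
  else
    let max_proficiency : Int :=
      PySem.List.maxD (languages.map (fun l => (l.lookup "proficiency_score").getD 0)) (fun y => y) 0
    if max_proficiency ≥ 85 then 4
    else if max_proficiency ≥ 70 then 3
    else if max_proficiency ≥ 50 then 2
    else 1

-- ===== PORT B =====
def pvLevelOf (language : List (String × Int)) : Int :=
  let score := (language.lookup "proficiency_score").getD 0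
  if score ≥ 85 then 4
  else if score ≥ 70 then 3
  else if score ≥ 50 then 2
  else 1

def estimate_developer_level_py_alt (fingerprint : List (String × List (List (String × Int)))) : Int :=
  ((fingerprint.lookup "languages").getD []).foldl
    (fun best_level language => max best_level (pvLevelOf language)) 1

-- ===== PRECONDITION & SPEC =====
def Spec_estimate_developer_level_py (fingerprint : List (String × List (List (String × Int)))) (out : Int) : Prop := out = estimate_developer_level_py_alt fingerprint
instance (fingerprint : List (String × List (List (String × Int)))) (out : Int) : Decidable (Spec_estimate_developer_level_py fingerprint out) := by unfold Spec_estimate_developer_level_py; infer_instance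

-- ===== CLAIM (what is proved, stated in full; the proofs are below) =====
def Claim_equal_estimate_developer_level_py : Prop := ∀ (fingerprint : List (String × List (List (String × Int)))), Dom_estimate_developer_level_py fingerprint → Spec_estimate_developer_level_py fingerprint (estimate_developer_level_py fingerprint)

-- ===== LEMMAS AND PROOFS =====

/-- A's threshold classification of a score. -/
def pvCls (m : Int) : Int :=
  if m ≥ 85 then 4 else if m ≥ 70 then 3 else if m ≥ 50 then 2 else 1

theorem pvLevelOf_eq (l : List (String × Int)) :
    pvLevelOf l = pvCls ((l.lookup "proficiency_score").getD 0) := rfl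

theorem pvCls_max (a b : Int) : pvCls (max a b) = max (pvCls a) (pvCls b) := by
  rcases le_total a b with h | h
  · rw [max_eq_right h]; unfold pvCls; split_ifs <;> omega
  · rw [max_eq_left h]; unfold pvCls; split_ifs <;> omega

theorem one_le_pvCls (m : Int) : 1 ≤ pvCls m := by
  unfold pvCls; split_ifs <;> omega

/-- classify-each-then-fold-max equals classify-the-fold-of-max. -/
theorem pvFold_eq (ls : List (List (String × Int))) (s : Int) :
    ls.foldl (fun b l => max b (pvLevelOf l)) (pvCls s)
      = pvCls (ls.foldl (fun m l => max m ((l.lookup "proficiency_score").getD 0)) s) := by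
  induction ls generalizing s with
  | nil => rfl
  | cons x t ih =>
    simp only [List.foldl_cons, pvLevelOf_eq, ← pvCls_max]
    exact ih _

-- ===== VERDICT (by name: the statement is the Claim_ definition above) =====
theorem estimate_developer_level_py_spec : Claim_equal_estimate_developer_level_py := by
  intro fingerprint _
  show estimate_developer_level_py fingerprint = estimate_developer_level_py_alt fingerprint
  unfold estimate_developer_level_py estimate_developer_level_py_alt
  cases h : (fingerprint.lookup "languages").getD [] with
  | nil => rfl
  | cons x t =>
    simp only [List.isEmpty_cons, if_neg Bool.false_ne_true, List.map_cons,
      PySem.List.maxD, PySem.List.max?_id_cons, List.foldl_cons]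
    rw [max_eq_right (by rw [pvLevelOf_eq]; exact one_le_pvCls _), pvLevelOf_eq, pvFold_eq,
      List.foldl_map]
    rfl
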